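-- pv_equiv track=rewrite | github.com/nabilelbajdi/advent-of-code-2025 | day02/solution.py | generate_invalid_ids
-- ===== SOURCE A (Python) =====
-- def generate_invalid_ids(max_num):
--     """Generate all invalid IDs (digits repeated twice) up to max_num"""
--     invalid = []
--     k = 1
--
--     while True:
--         # for half-length k, generate IDs like: n * (10^k + 1)
--         # where n goes from 10^(k-1) to 10^k - 1
--         multiplier = 10**k + 1
--         start_half = 10**(k-1)
--         end_half = 10**k - 1
--
--         # check if smallest invalid ID exceeds max
--         smallest = start_half * multiplier
--         if smallest > max_num:
--             break
--
--         for n in range(start_half, end_half + 1):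
--             invalid_id = n * multiplier
--             if invalid_id > max_num:
--                 break
--             invalid.append(invalid_id)
--
--         k += 1
--
--     return invalid
-- ===== SOURCE B (Python) =====
-- def generate_invalid_ids(max_num):
--     """Generate all invalid IDs (digits repeated twice) up to max_num"""
--     invalid = []
--     n, p = 1, 10  # p = 10 ** (number of digits of n)
--     while True:
--         if n == p:
--             p *= 10
--         v = n * p + n  # n's digits written twice
--         if v > max_num:
--             return invalid
--         invalid.append(v)
--         n += 1
-- ===== Notes on version B (the rewrite author's own statement) =====
-- stated objective: simpler
-- what changed: Replaced A's nested loops (outer over half-lengths k with powers recomputed and a smallest-ID pre-check, inner over the k-digit halves with a break) by one flat loop over successive half-values n that tracks the power of ten incrementally and stops at the first doubled value exceeding max_num, relying on the doubled values being strictly increasing in n.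
import Mathlib
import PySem

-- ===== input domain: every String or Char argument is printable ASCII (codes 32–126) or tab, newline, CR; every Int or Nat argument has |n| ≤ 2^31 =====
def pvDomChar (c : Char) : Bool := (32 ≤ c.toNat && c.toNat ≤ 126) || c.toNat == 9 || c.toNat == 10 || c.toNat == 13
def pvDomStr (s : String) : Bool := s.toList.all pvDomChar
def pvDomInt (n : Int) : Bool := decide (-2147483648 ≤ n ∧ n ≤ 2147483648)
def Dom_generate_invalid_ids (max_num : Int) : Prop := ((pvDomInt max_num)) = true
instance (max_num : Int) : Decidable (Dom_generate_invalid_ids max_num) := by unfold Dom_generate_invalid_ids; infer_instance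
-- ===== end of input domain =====

-- B replaces A's nested k/n loops by a single flat loop over n with an incrementally
-- tracked power of ten; same return value, chosen for being shorter and flatter.

-- ===== PORT A =====
-- inner `for n in range(start_half, end_half + 1)` with its break, over the pyRange list
def aInner (max_num mult : Int) : List Int → List Int → List Int
  | acc, [] => acc
  | acc, n :: rest =>
    if n * mult > max_num then acc
    else aInner max_num mult (acc ++ [n * mult]) rest

-- outer `while True` over k (k : Nat, starts at 1); terminates because once
-- smallest > max_num the loop breaks, and smallest grows with k
def aOuter (max_num : Int) (k : Nat) (acc : List Int) : List Int :=
  let mult : Int := 10 ^ k + 1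
  let start_half : Int := 10 ^ (k - 1)
  let end_half : Int := 10 ^ k - 1
  let smallest := start_half * mult
  if smallest > max_num then acc
  else aOuter max_num (k + 1) (aInner max_num mult acc (PySem.List.pyRange start_half (end_half + 1) 1))
termination_by (2 * max_num.toNat + 4) - (10 ^ (k - 1) + k)
decreasing_by
  rename_i h0
  have hns : (10:Int) ^ (k - 1) * (10 ^ k + 1) ≤ max_num := not_lt.mp h0
  have h1 : ((10 ^ (k - 1) : Nat) : Int) ≤ max_num := by
    push_cast
    nlinarith [hns, pow_pos (show (0:Int) < 10 by norm_num) (k - 1),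
               pow_pos (show (0:Int) < 10 by norm_num) k]
  have hk : k - 1 < 10 ^ (k - 1) := Nat.lt_pow_self (by norm_num)
  have hmono : (10:Nat) ^ (k - 1) ≤ 10 ^ (k + 1 - 1) :=
    Nat.pow_le_pow_right (by norm_num) (by omega)
  omega

def generate_invalid_ids (max_num : Int) : List Int := aOuter max_num 1 []

-- ===== PORT B =====
-- the single `while True` loop over n, with p = 10 ** digits(n) kept incrementally
-- (n, p are the positive counters of Source B, carried as Nat)
def bLoop (max_num : Int) (n p : Nat) (acc : List Int) : List Int :=
  let p' := if n = p then p * 10 else p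
  let v : Int := (n : Int) * (p' : Int) + (n : Int)
  if v > max_num then acc
  else bLoop max_num (n + 1) p' (acc ++ [v])
termination_by (max_num.toNat + 2) - n
decreasing_by
  rename_i h0
  have hns : ¬ ((n : Int) * ((if n = p then p * 10 else p : Nat) : Int) + (n : Int) > max_num) := h0
  have hv : (0:Int) ≤ (n : Int) * ((if n = p then p * 10 else p : Nat) : Int) := by positivity
  omega

def generate_invalid_ids_alt (max_num : Int) : List Int := bLoop max_num 1 10 []

-- ===== PRECONDITION & SPEC =====
def Spec_generate_invalid_ids (max_num : Int) (out : List Int) : Prop := out = generate_invalid_ids_alt max_num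
instance (max_num : Int) (out : List Int) : Decidable (Spec_generate_invalid_ids max_num out) := by unfold Spec_generate_invalid_ids; infer_instance

-- ===== CLAIM (what is proved, stated in full; the proofs are below) =====
def Claim_equal_generate_invalid_ids : Prop := ∀ (max_num : Int), Dom_generate_invalid_ids max_num → Spec_generate_invalid_ids max_num (generate_invalid_ids max_num)

-- ===== LEMMAS AND PROOFS =====

-- "A resumed at position n inside block k": finish the inner loop from n, then continue the outer loop
def aResume (max_num : Int) (k n : Nat) (acc : List Int) : List Int :=
  aOuter max_num (k + 1) (aInner max_num ((10:Int) ^ k + 1) acc (PySem.List.pyRange (n : Int) ((10:Int) ^ k) 1))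

theorem cast_pow10 (j : Nat) : (((10:Nat) ^ j : Nat) : Int) = (10:Int) ^ j := by
  push_cast; ring

-- once the next value already exceeds max_num, resuming A returns the accumulator unchanged
theorem aResume_break (max_num : Int) (k n : Nat) (acc : List Int)
    (hn : n ≤ 10 ^ k) (hv : max_num < (n : Int) * ((10:Int) ^ k + 1)) :
    aResume max_num k n acc = acc := by
  have hni : (n : Int) ≤ (10:Int) ^ k := by rw [← cast_pow10]; exact_mod_cast hn
  have hsm : max_num < (10:Int) ^ (k + 1 - 1) * (10 ^ (k + 1) + 1) := by
    have h1 : (0:Int) < 10 ^ k := pow_pos (by norm_num) k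
    have h2 : (10:Int) ^ k ≤ 10 ^ (k + 1) := by
      have : (10:Int) ^ (k + 1) = 10 ^ k * 10 := by ring
      nlinarith
    have hn0 : (0:Int) ≤ (n : Int) := Int.natCast_nonneg n
    have : (n : Int) * ((10:Int) ^ k + 1) ≤ (10:Int) ^ k * (10 ^ (k + 1) + 1) := by nlinarith
    have hk1 : (k + 1) - 1 = k := by omega
    rw [hk1]; linarith
  have houter : ∀ acc', aOuter max_num (k + 1) acc' = acc' := by
    intro acc'
    rw [aOuter]
    simp only [gt_iff_lt, if_pos hsm]
  unfold aResume
  rcases Nat.lt_or_ge n (10 ^ k) with hlt | hge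
  · have hlt' : (n : Int) < (10:Int) ^ k := by rw [← cast_pow10]; exact_mod_cast hlt
    rw [PySem.List.pyRange_one_cons hlt']
    simp only [aInner, gt_iff_lt, if_pos hv]
    exact houter acc
  · have heq : (n : Int) = (10:Int) ^ k := le_antisymm hni (by rw [← cast_pow10]; exact_mod_cast hge)
    rw [PySem.List.pyRange_one_eq_nil (le_of_eq heq.symm)]
    simp only [aInner]
    exact houter acc

theorem val_eq (n j : Nat) : (n : Int) * (((10:Nat) ^ j : Nat) : Int) + (n : Int) = (n : Int) * ((10:Int) ^ j + 1) := by
  push_cast; ring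

-- one inner step of A, resumed
theorem aResume_step (max_num : Int) (k n : Nat) (acc : List Int)
    (hlt : n < 10 ^ k) (hle : (n : Int) * ((10:Int) ^ k + 1) ≤ max_num) :
    aResume max_num k n acc = aResume max_num k (n + 1) (acc ++ [(n : Int) * ((10:Int) ^ k + 1)]) := by
  have hlt' : (n : Int) < (10:Int) ^ k := by rw [← cast_pow10]; exact_mod_cast hlt
  unfold aResume
  rw [PySem.List.pyRange_one_cons hlt']
  simp only [aInner, gt_iff_lt, if_neg (not_lt.mpr hle)]
  norm_cast

-- at the block boundary the remaining inner range is empty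
theorem aResume_boundary (max_num : Int) (k : Nat) (acc : List Int) :
    aResume max_num k (10 ^ k) acc = aOuter max_num (k + 1) acc := by
  unfold aResume
  rw [cast_pow10, PySem.List.pyRange_one_eq_nil le_rfl]
  simp only [aInner]

theorem aOuter_eq_aResume (max_num : Int) (k : Nat) (acc : List Int) :
    aOuter max_num k acc = aResume max_num k (10 ^ (k - 1)) acc := by
  rw [aOuter]
  rcases lt_or_ge max_num ((10:Int) ^ (k - 1) * ((10:Int) ^ k + 1)) with h | h
  · rw [if_pos h]
    have hv : max_num < ((10 ^ (k - 1) : Nat) : Int) * ((10:Int) ^ k + 1) := by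
      rw [cast_pow10]; exact h
    exact (aResume_break max_num k _ acc (Nat.pow_le_pow_right (by norm_num) (by omega)) hv).symm
  · rw [if_neg (not_lt.mpr h)]
    unfold aResume
    have e1 : ((10:Int) ^ k - 1) + 1 = 10 ^ k := by ring
    rw [e1, cast_pow10]

theorem bLoop_eq_aResume (max_num : Int) : ∀ (m n k : Nat) (acc : List Int),
    max_num.toNat + 2 ≤ n + m → 1 ≤ k → 10 ^ (k - 1) ≤ n → n ≤ 10 ^ k →
    bLoop max_num n (10 ^ k) acc = aResume max_num k n acc := by
  intro m
  induction m with
  | zero =>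
    intro n k acc hm hk h1 h2
    have hn : max_num < (n : Int) := by omega
    have hv : max_num < (n : Int) * ((10:Int) ^ k + 1) := by
      nlinarith [pow_pos (show (0:Int) < 10 by norm_num) k, Int.natCast_nonneg n]
    rw [bLoop]
    have hvb : (n : Int) * ((if n = 10 ^ k then 10 ^ k * 10 else 10 ^ k : Nat) : Int) + (n : Int) > max_num := by
      have : (0:Int) ≤ (n : Int) * ((if n = 10 ^ k then 10 ^ k * 10 else 10 ^ k : Nat) : Int) := by positivity
      omega
    rw [if_pos hvb]
    exact (aResume_break max_num k n acc h2 hv).symm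
  | succ m ih =>
    intro n k acc hm hk h1 h2
    rcases Nat.lt_or_ge n (10 ^ k) with hlt | hge
    · -- interior of block k: n < p, no p update
      have hne : n ≠ 10 ^ k := Nat.ne_of_lt hlt
      rw [bLoop]
      simp only [if_neg hne]
      rw [val_eq n k]
      rcases lt_or_ge max_num ((n : Int) * ((10:Int) ^ k + 1)) with hv | hv
      · rw [if_pos hv]
        exact (aResume_break max_num k n acc h2 hv).symm
      · rw [if_neg (not_lt.mpr hv), aResume_step max_num k n acc hlt hv]
        exact ih (n + 1) k (acc ++ [(n : Int) * ((10:Int) ^ k + 1)]) (by omega) hk (by omega)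
          (by omega)
    · -- block boundary: n = p, p is multiplied by 10
      have heq : n = 10 ^ k := le_antisymm h2 hge
      subst heq
      rw [bLoop]
      have hps : (10:Nat) ^ k * 10 = 10 ^ (k + 1) := (pow_succ 10 k).symm
      simp only [reduceIte, hps]
      rw [val_eq (10 ^ k) (k + 1)]
      rw [aResume_boundary max_num k acc, aOuter_eq_aResume max_num (k + 1) acc]
      have hkk : k + 1 - 1 = k := by omega
      rw [hkk]
      rcases lt_or_ge max_num (((10 ^ k : Nat) : Int) * ((10:Int) ^ (k + 1) + 1)) with hv | hv
      · rw [if_pos hv]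
        exact (aResume_break max_num (k + 1) (10 ^ k) acc
          (Nat.pow_le_pow_right (by norm_num) (by omega)) hv).symm
      · rw [if_neg (not_lt.mpr hv),
          aResume_step max_num (k + 1) (10 ^ k) acc (by nlinarith [Nat.pow_pos (n := k) (show 0 < 10 by norm_num)]) hv]
        have hb : max_num.toNat + 2 ≤ 10 ^ k + 1 + m := by
          have h0 : ((10 ^ k : Nat) : Int) ≤ max_num := by
            nlinarith [pow_pos (show (0:Int) < 10 by norm_num) (k + 1), Int.natCast_nonneg (10 ^ k)]
          omega
        exact ih (10 ^ k + 1) (k + 1) _ hb (by omega)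
          (by rw [Nat.add_sub_cancel]; omega)
          (by nlinarith [Nat.pow_pos (n := k) (show 0 < 10 by norm_num)])

-- ===== VERDICT (by name: the statement is the Claim_ definition above) =====
theorem generate_invalid_ids_spec : Claim_equal_generate_invalid_ids := by
  intro max_num _
  unfold Spec_generate_invalid_ids generate_invalid_ids generate_invalid_ids_alt
  have h := bLoop_eq_aResume max_num (max_num.toNat + 2) 1 1 [] (by omega) le_rfl
    (by norm_num) (by norm_num)
  rw [aOuter_eq_aResume max_num 1 []]
  norm_num at h ⊢
  exact h.symm
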